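-- pv_equiv track=rewrite | github.com/Pshypher/recursive-programming | chapter_04/exercise_04_11.py | num_processed_bit
-- ===== SOURCE A (Python) =====
-- def num_processed_bit(y):
--
--     def decimal_to_binary(v):
--         if v < 2:
--             return v
--         else:
--             return (decimal_to_binary(v // 2)
--                     * 10 + (v % 2))
--
--     def least_significant_bit(x):
--         if x == 0:
--             return 0
--         elif x == 1 or (x % 10) == 1:
--             return 1
--         else:
--             return least_significant_bit(x // 10) + 1
--
--
--     if y == 1:
--         return 1
--     else:
--         binary = decimal_to_binary(y)
--         bits = least_significant_bit(binary)
--         return (num_processed_bit(y - 1)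
--                 + bits)
-- ===== SOURCE B (Python) =====
-- def num_processed_bit(y):
--     # closed form: sum of (1-based index of lowest set bit) for 1..y equals 2*y - popcount(y)
--     return 2 * y - y.bit_count()
-- ===== Notes on version B (the rewrite author's own statement) =====
-- stated objective: faster
-- what changed: Replaces the O(y log y) recursion (rebuild the binary expansion of every k <= y as a decimal numeral and scan it for the lowest 1-bit) by the closed form 2*y - popcount(y).
import Mathlib
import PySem

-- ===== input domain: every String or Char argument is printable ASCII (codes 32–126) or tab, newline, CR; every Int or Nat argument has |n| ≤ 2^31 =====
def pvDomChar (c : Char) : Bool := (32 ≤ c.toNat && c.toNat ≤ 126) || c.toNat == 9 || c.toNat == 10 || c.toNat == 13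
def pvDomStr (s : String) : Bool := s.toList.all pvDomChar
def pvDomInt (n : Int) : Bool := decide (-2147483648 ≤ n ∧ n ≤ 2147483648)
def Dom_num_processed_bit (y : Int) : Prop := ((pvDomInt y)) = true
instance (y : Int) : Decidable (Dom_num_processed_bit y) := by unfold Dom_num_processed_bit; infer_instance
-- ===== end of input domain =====

-- B computes the same sum by the closed form 2*y - popcount(y); equivalence is proved for y ≥ 1
-- (on y ≤ 0 the Python A recurses without bound, so Pre_ excludes it).

-- ===== PORT A =====
-- helper decimal_to_binary: the binary expansion of v written as a decimal numeral
def pvD2b (v : Int) : Int :=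
  if v < 2 then v
  else pvD2b (PySem.Int.floordiv v 2) * 10 + PySem.Int.mod v 2
termination_by v.toNat
decreasing_by
  simp only [PySem.Int.floordiv_eq_ediv_of_pos (by omega : (0:Int) < 2)]
  omega

-- helper least_significant_bit: 1-based position of the lowest digit 1 of x
def pvLsb (x : Int) : Int :=
  if x == 0 then 0
  else if x == 1 || PySem.Int.mod x 10 == 1 then 1
  else if x < 0 then 0  -- totality guard: on such x the Python helper recurses forever (never reached from A's call sites)
  else pvLsb (PySem.Int.floordiv x 10) + 1
termination_by x.toNat
decreasing_by
  simp only [PySem.Int.floordiv_eq_ediv_of_pos (by omega : (0:Int) < 10)]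
  rename_i h1 h2 h3
  simp only [beq_iff_eq, Bool.or_eq_true] at h1 h2
  omega

def num_processed_bit (y : Int) : Int :=
  if y == 1 then 1
  else if y < 1 then 0  -- totality guard: the Python recurses without end here (excluded by Pre_)
  else num_processed_bit (y - 1) + pvLsb (pvD2b y)
termination_by y.toNat
decreasing_by
  rename_i h1 h2
  simp only [beq_iff_eq] at h1
  omega

-- ===== PORT B =====
-- Source B: return 2 * y - y.bit_count()  (bit_count ported as PySem.Int.bitCount)
def num_processed_bit_alt (y : Int) : Int := 2 * y - (PySem.Int.bitCount y : Int)

-- ===== PRECONDITION & SPEC =====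
-- Pre_ excludes y ≤ 0, on which the Python A recurses without bound (RecursionError)
def Pre_num_processed_bit (y : Int) : Prop := 1 ≤ y
instance (y : Int) : Decidable (Pre_num_processed_bit y) := by unfold Pre_num_processed_bit; infer_instance
def pvWitness_num_processed_bit : Int := (5)

def Spec_num_processed_bit (y : Int) (out : Int) : Prop := out = num_processed_bit_alt y
instance (y : Int) (out : Int) : Decidable (Spec_num_processed_bit y out) := by unfold Spec_num_processed_bit; infer_instance

-- ===== CLAIM (what is proved, stated in full; the proofs are below) =====
def Claim_equal_num_processed_bit : Prop := ∀ (y : Int), Dom_num_processed_bit y → Pre_num_processed_bit y → Spec_num_processed_bit y (num_processed_bit y)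

-- ===== LEMMAS AND PROOFS =====

theorem pvD2b_eq (v : Int) : pvD2b v = if v < 2 then v else pvD2b (PySem.Int.floordiv v 2) * 10 + PySem.Int.mod v 2 := by
  rw [pvD2b]

theorem pvLsb_eq (x : Int) : pvLsb x =
    if x == 0 then 0
    else if x == 1 || PySem.Int.mod x 10 == 1 then 1
    else if x < 0 then 0
    else pvLsb (PySem.Int.floordiv x 10) + 1 := by
  rw [pvLsb]

theorem num_processed_bit_eq (y : Int) : num_processed_bit y =
    if y == 1 then 1
    else if y < 1 then 0
    else num_processed_bit (y - 1) + pvLsb (pvD2b y) := by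
  rw [num_processed_bit]

theorem pvD2b_pos : ∀ n : Nat, 1 ≤ n → 1 ≤ pvD2b (n : Int) := by
  intro n
  induction n using Nat.strong_induction_on with
  | _ n ih =>
    intro h1
    rw [pvD2b_eq]
    by_cases h2 : (n : Int) < 2
    · have hn1 : n = 1 := by omega
      subst hn1; norm_num
    · rw [if_neg h2, PySem.Int.floordiv_eq_ediv_of_pos (by omega), PySem.Int.mod_eq_emod_of_pos (by omega)]
      have hdiv : (n : Int) / 2 = ((n / 2 : Nat) : Int) := by omega
      rw [hdiv]
      have hrec := ih (n / 2) (by omega) (by omega)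
      have hm : 0 ≤ (n : Int) % 2 := by omega
      linarith

-- key step: the value A adds for y = n equals the popcount difference the closed form adds
theorem pvKey : ∀ n : Nat, 1 ≤ n →
    pvLsb (pvD2b (n : Int)) + (PySem.Int.bitCount (n : Int) : Int)
      = (PySem.Int.bitCount ((n - 1 : Nat) : Int) : Int) + 2 := by
  intro n
  induction n using Nat.strong_induction_on with
  | _ n ih =>
    intro h1
    by_cases h2 : n = 1
    · subst h2
      rw [pvD2b_eq]; norm_num
      rw [pvLsb_eq]; norm_num
      decide
    have hn2 : 2 ≤ n := by omega
    have hm1 : 1 ≤ n / 2 := by omega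
    have hp : 1 ≤ pvD2b ((n / 2 : Nat) : Int) := pvD2b_pos (n / 2) hm1
    have hd2b : pvD2b (n : Int) = pvD2b ((n / 2 : Nat) : Int) * 10 + ((n % 2 : Nat) : Int) := by
      rw [pvD2b_eq, if_neg (by omega),
        PySem.Int.floordiv_eq_ediv_of_pos (by omega), PySem.Int.mod_eq_emod_of_pos (by omega)]
      have hdiv : (n : Int) / 2 = ((n / 2 : Nat) : Int) := by omega
      have hmod : (n : Int) % 2 = ((n % 2 : Nat) : Int) := by omega
      rw [hdiv, hmod]
    have hbcn := PySem.Int.bitCount_natCast (m := n) (by omega)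
    by_cases hpar : n % 2 = 0
    · -- even case: n = 2 * (n / 2)
      have hbcn1 := PySem.Int.bitCount_natCast (m := n - 1) (by omega)
      have hmod1 : (n - 1) % 2 = 1 := by omega
      have hdiv1 : (n - 1) / 2 = n / 2 - 1 := by omega
      rw [hmod1, hdiv1] at hbcn1
      rw [hd2b, hpar]
      rw [Nat.cast_zero, add_zero, pvLsb_eq]
      rw [if_neg (by simp only [beq_iff_eq]; omega)]
      rw [if_neg (by
        simp only [beq_iff_eq, Bool.or_eq_true, not_or]
        refine ⟨by omega, ?_⟩
        rw [PySem.Int.mod_eq_emod_of_pos (by omega), Int.mul_emod_left]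
        simp)]
      rw [if_neg (by omega)]
      rw [PySem.Int.floordiv_eq_ediv_of_pos (by omega), Int.mul_ediv_cancel _ (by omega : (10:Int) ≠ 0)]
      have hihm := ih (n / 2) (by omega) hm1
      rw [hbcn, hbcn1, hpar]
      omega
    · -- odd case: n = 2 * (n / 2) + 1
      have hpar1 : n % 2 = 1 := by omega
      have hbcn1 := PySem.Int.bitCount_natCast (m := n - 1) (by omega)
      have hmod1 : (n - 1) % 2 = 0 := by omega
      have hdiv1 : (n - 1) / 2 = n / 2 := by omega
      rw [hmod1, hdiv1] at hbcn1
      rw [hd2b, hpar1, Nat.cast_one]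
      rw [pvLsb_eq]
      rw [if_neg (by simp only [beq_iff_eq]; omega)]
      rw [if_pos (by
        simp only [beq_iff_eq, Bool.or_eq_true]
        right
        rw [PySem.Int.mod_eq_emod_of_pos (by omega)]
        omega)]
      rw [hbcn, hbcn1, hpar1]
      omega

theorem pvMain : ∀ n : Nat, 1 ≤ n →
    num_processed_bit (n : Int) = 2 * (n : Int) - (PySem.Int.bitCount (n : Int) : Int) := by
  intro n
  induction n with
  | zero => omega
  | succ k ih =>
    intro _
    by_cases hk : k = 0
    · subst hk
      rw [num_processed_bit_eq]; norm_num
      decide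
    · rw [num_processed_bit_eq]
      rw [if_neg (by simp only [beq_iff_eq]; push_cast; omega)]
      rw [if_neg (by omega)]
      have hsub : ((k + 1 : Nat) : Int) - 1 = (k : Int) := by push_cast; ring
      rw [hsub, ih (by omega)]
      have hkey := pvKey (k + 1) (by omega)
      simp only [Nat.add_sub_cancel] at hkey
      push_cast at hkey ⊢
      omega

-- ===== VERDICT (by name: the statement is the Claim_ definition above) =====
theorem num_processed_bit_spec : Claim_equal_num_processed_bit := by
  intro y _ hpre
  unfold Pre_num_processed_bit at hpre
  unfold Spec_num_processed_bit num_processed_bit_alt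
  have hy : y = ((y.toNat : Nat) : Int) := by omega
  rw [hy]
  exact pvMain y.toNat (by omega)
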